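-- pv_equiv track=rewrite | github.com/globalwordnet/english-namenet | open_english_namenet/taxon_align.py | find_all_hypos
-- ===== SOURCE A (Python) =====
-- def find_all_hypos(ssid, hypos):
--     """
--     Recursively find all hyponyms of a given WordNet SSID.
--     """
--     if ssid not in hypos:
--         return []
--     result = []
--     for hypo in hypos[ssid]:
--         result.append(hypo)
--         result.extend(find_all_hypos(hypo, hypos))
--     return result
-- ===== SOURCE B (Python) =====
-- def find_all_hypos(ssid, hypos):
--     """
--     Recursively find all hyponyms of a given WordNet SSID,
--     caching each node's hyponym list in a memo dict.
--     """
--     memo = {}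
--
--     def visit(node):
--         cached = memo.get(node)
--         if cached is not None:
--             return cached
--         result = []
--         for child in hypos.get(node, ()):
--             result.append(child)
--             result.extend(visit(child))
--         memo[node] = result
--         return result
--
--     return visit(ssid)
-- ===== Notes on version B (the rewrite author's own statement) =====
-- stated objective: alternative
-- what changed: B threads a memo dict through the recursion and returns the cached hyponym list on a repeated node, where A re-runs the whole recursion on every visit; on the generated (tree-like) timing inputs this was not measurably faster, so no speed is claimed.
import Mathlib
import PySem

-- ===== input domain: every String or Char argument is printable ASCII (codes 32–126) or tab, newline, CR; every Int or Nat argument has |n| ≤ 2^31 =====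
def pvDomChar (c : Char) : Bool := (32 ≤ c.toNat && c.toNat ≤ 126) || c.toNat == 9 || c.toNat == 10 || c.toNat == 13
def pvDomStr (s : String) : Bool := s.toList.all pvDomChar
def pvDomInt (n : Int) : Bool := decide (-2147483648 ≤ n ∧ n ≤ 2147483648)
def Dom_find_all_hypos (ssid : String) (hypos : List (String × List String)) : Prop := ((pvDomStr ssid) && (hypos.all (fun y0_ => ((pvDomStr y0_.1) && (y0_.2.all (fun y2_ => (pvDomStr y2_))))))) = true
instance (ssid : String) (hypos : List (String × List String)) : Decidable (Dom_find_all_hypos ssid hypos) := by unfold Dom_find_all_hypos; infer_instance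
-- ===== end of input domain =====

-- B threads a memo dict through the recursion and reuses a node's cached hyponym list on a
-- repeated visit instead of re-running A's plain recursion there (alternative algorithm;
-- equal return value on all inputs where A returns).


-- ===== PORT A =====
-- A's plain recursion, with a fuel guard only to make it total: under Pre_ (every hyponym
-- chain from ssid has at most hypos.length edges) the fuel is never exhausted.
def goA (hypos : List (String × List String)) : Nat → String → List String
  | 0, _ => []
  | f + 1, ssid =>
    match hypos.lookup ssid with
    | none => []                                   -- if ssid not in hypos: return []
    | some cs => cs.foldl (fun acc c => acc ++ (c :: goA hypos f c)) []
                                                   -- result.append(hypo); result.extend(rec)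

def find_all_hypos (ssid : String) (hypos : List (String × List String)) : List String :=
  goA hypos (hypos.length + 1) ssid

-- ===== PORT B =====
-- B's memoized recursion: the memo dict is threaded through; same fuel guard as A's port.
def goB (hypos : List (String × List String)) :
    Nat → String → PySem.Dict String (List String) →
    (List String × PySem.Dict String (List String))
  | 0, _, memo => ([], memo)
  | f + 1, node, memo =>
    match memo.get? node with
    | some cached => (cached, memo)                -- cache hit
    | none =>
      let p := ((hypos.lookup node).getD []).foldl -- for child in hypos.get(node, ()):
        (fun (st : List String × PySem.Dict String (List String)) c =>
          let r := goB hypos f c st.2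
          (st.1 ++ (c :: r.1), r.2)) ([], memo)
      (p.1, p.2.insert node p.1)                   -- memo[node] = result

def find_all_hypos_alt (ssid : String) (hypos : List (String × List String)) : List String :=
  (goB hypos (hypos.length + 1) ssid PySem.Dict.empty).1

-- ===== PRECONDITION & SPEC =====
-- bnd hypos n k = true iff every hyponym chain starting at k has at most n edges.
def bnd (hypos : List (String × List String)) : Nat → String → Bool
  | 0, k => ((hypos.lookup k).getD []).isEmpty
  | n + 1, k => ((hypos.lookup k).getD []).all (bnd hypos n)

-- Pre_ excludes exactly the inputs where the hyponym graph reachable from ssid is cyclic: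
-- there Python A (and B) recurse forever and raise RecursionError, returning no value.
-- On acyclic data every chain from ssid has at most hypos.length edges, so Pre_ holds.
def Pre_find_all_hypos (ssid : String) (hypos : List (String × List String)) : Prop :=
  bnd hypos hypos.length ssid = true
instance (ssid : String) (hypos : List (String × List String)) : Decidable (Pre_find_all_hypos ssid hypos) := by unfold Pre_find_all_hypos; infer_instance

def pvWitness_find_all_hypos : String × (List (String × List String)) :=
  ("a", [("a", ["b", "c"]), ("b", ["c"]), ("c", [])])

def Spec_find_all_hypos (ssid : String) (hypos : List (String × List String)) (out : List String) : Prop := out = find_all_hypos_alt ssid hypos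
instance (ssid : String) (hypos : List (String × List String)) (out : List String) : Decidable (Spec_find_all_hypos ssid hypos out) := by unfold Spec_find_all_hypos; infer_instance

-- ===== CLAIM (what is proved, stated in full; the proofs are below) =====
def Claim_equal_find_all_hypos : Prop := ∀ (ssid : String) (hypos : List (String × List String)), Dom_find_all_hypos ssid hypos → Pre_find_all_hypos ssid hypos → Spec_find_all_hypos ssid hypos (find_all_hypos ssid hypos)

-- ===== LEMMAS AND PROOFS =====

-- A's recursion is fuel-insensitive on nodes whose chains are bounded below the fuel.
theorem goA_fuel (hypos : List (String × List String)) :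
    ∀ (n : Nat) (k : String) (f f' : Nat), bnd hypos n k = true → n < f → n < f' →
      goA hypos f k = goA hypos f' k := by
  intro n
  induction n with
  | zero =>
    intro k f f' hb hf hf'
    match f, f' with
    | f₀ + 1, f₀' + 1 =>
      simp only [goA]
      cases hl : hypos.lookup k with
      | none => rfl
      | some cs =>
        simp only [bnd, hl, Option.getD] at hb
        have : cs = [] := by simpa using hb
        subst this; rfl
  | succ n ih =>
    intro k f f' hb hf hf'
    match f, f' with
    | f₀ + 1, f₀' + 1 =>
      simp only [goA]
      cases hl : hypos.lookup k with
      | none => rfl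
      | some cs =>
        simp only [bnd, hl, Option.getD, List.all_eq_true] at hb
        apply PySem.List.foldl_congr_mem'
        intro c hc acc
        rw [ih c f₀ f₀' (hb c hc) (by omega) (by omega)]

-- the value A computes, with its canonical fuel
def valA (hypos : List (String × List String)) (k : String) : List String :=
  goA hypos (hypos.length + 1) k

-- invariant of B's memo dict: every cached value is A's value for that key
def GoodC (hypos : List (String × List String)) (memo : PySem.Dict String (List String)) : Prop :=
  ∀ k v, memo.get? k = some v → v = valA hypos k

theorem goodC_insert (hypos : List (String × List String)) (memo : PySem.Dict String (List String))
    (k : String) (v : List String) (hg : GoodC hypos memo) (hv : v = valA hypos k) :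
    GoodC hypos (memo.insert k v) := by
  intro k' v' h
  rw [PySem.Dict.get?_insert] at h
  split at h
  · cases h; next heq => subst heq; exact hv
  · exact hg k' v' h

theorem valA_expand (hypos : List (String × List String)) (n : Nat) (k : String)
    (hb : bnd hypos (n + 1) k = true) (hn : n + 1 ≤ hypos.length) :
    valA hypos k = ((hypos.lookup k).getD []).flatMap (fun c => c :: valA hypos c) := by
  unfold valA
  cases hl : hypos.lookup k with
  | none => simp [goA, hl]
  | some cs =>
    simp only [bnd, hl, Option.getD, List.all_eq_true] at hb
    simp only [goA, hl, Option.getD]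
    rw [show (List.foldl (fun acc c => acc ++ c :: goA hypos hypos.length c) [] cs)
        = List.foldl (fun acc c => acc ++ c :: valA hypos c) [] cs from ?_]
    · rw [PySem.List.foldl_append_eq_flatMap]; rfl
    · apply PySem.List.foldl_congr_mem'
      intro c hc acc
      rw [goA_fuel hypos n c hypos.length (hypos.length + 1) (hb c hc) (by omega) (by omega)]
      rfl

theorem goB_spec (hypos : List (String × List String)) :
    ∀ (n : Nat) (k : String) (f : Nat) (memo : PySem.Dict String (List String)),
      bnd hypos n k = true → n ≤ hypos.length → n < f → GoodC hypos memo →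
      (goB hypos f k memo).1 = valA hypos k ∧ GoodC hypos (goB hypos f k memo).2 := by
  intro n
  induction n with
  | zero =>
    intro k f memo hb _ hf hg
    match f with
    | f₀ + 1 =>
      simp only [goB]
      cases hm : memo.get? k with
      | some v => exact ⟨hg k v hm, hg⟩
      | none =>
        simp only [bnd] at hb
        have hcs : (hypos.lookup k).getD [] = [] := by simpa using hb
        have hval : valA hypos k = [] := by
          unfold valA
          cases hl : hypos.lookup k with
          | none => simp [goA, hl]
          | some cs => rw [hl] at hcs; simp only [Option.getD] at hcs; simp [goA, hl, hcs]
        rw [hcs]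
        simp only [List.foldl_nil]
        exact ⟨hval.symm, goodC_insert hypos memo k [] hg hval.symm⟩
  | succ n ih =>
    intro k f memo hb hn hf hg
    match f with
    | f₀ + 1 =>
      simp only [goB]
      cases hm : memo.get? k with
      | some v => exact ⟨hg k v hm, hg⟩
      | none =>
        have hb' : ∀ c ∈ (hypos.lookup k).getD [], bnd hypos n c = true := by
          cases hl : hypos.lookup k with
          | none => simp
          | some cs => simp only [bnd, hl, Option.getD, List.all_eq_true] at hb; simpa using hb
        have fold : ∀ (cs : List String), (∀ c ∈ cs, bnd hypos n c = true) →
            ∀ (acc : List String) (m : PySem.Dict String (List String)), GoodC hypos m →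
            (cs.foldl (fun (st : List String × PySem.Dict String (List String)) c =>
              (st.1 ++ (c :: (goB hypos f₀ c st.2).1), (goB hypos f₀ c st.2).2)) (acc, m)).1
              = acc ++ cs.flatMap (fun c => c :: valA hypos c) ∧
            GoodC hypos (cs.foldl (fun (st : List String × PySem.Dict String (List String)) c =>
              (st.1 ++ (c :: (goB hypos f₀ c st.2).1), (goB hypos f₀ c st.2).2)) (acc, m)).2 := by
          intro cs
          induction cs with
          | nil => intro _ acc m hm'; exact ⟨by simp, hm'⟩
          | cons c cs ihc =>
            intro hcs acc m hm'
            simp only [List.foldl_cons]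
            have hrec := ih c f₀ m (hcs c (by simp)) (by omega) (by omega) hm'
            have hrest := ihc (fun x hx => hcs x (by simp [hx])) (acc ++ (c :: (goB hypos f₀ c m).1)) _ hrec.2
            refine ⟨?_, hrest.2⟩
            rw [hrest.1, hrec.1]
            simp
        have hmain := fold ((hypos.lookup k).getD []) hb' [] memo hg
        have hval := valA_expand hypos n k hb hn
        constructor
        · simp only []
          rw [hmain.1, hval]; rfl
        · simp only []
          exact goodC_insert hypos _ k _ hmain.2 (by rw [hmain.1, hval]; rfl)

-- ===== VERDICT (by name: the statement is the Claim_ definition above) =====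
theorem find_all_hypos_spec : Claim_equal_find_all_hypos := by
  intro ssid hypos _ hpre
  unfold Spec_find_all_hypos find_all_hypos find_all_hypos_alt
  have h := goB_spec hypos hypos.length ssid (hypos.length + 1) PySem.Dict.empty hpre
    (le_refl _) (Nat.lt_succ_self _)
    (by intro k v hv; rw [PySem.Dict.get?_empty] at hv; cases hv)
  rw [h.1]; rfl
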